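-- pv_equiv track=rewrite | github.com/gmini9999/SbsRsSimulator | _getData.py | getNumTrayMovingForLane
-- ===== SOURCE A (Python) =====
-- def getNumTrayMovingForLane(conveyors, laneId):
--     count = 0
--     for conveyor in conveyors:
--         if conveyor["tray"]:
--             count += 1
--         if 'laneId' in conveyor:
--             if conveyor["laneId"] == laneId:
--                 return count
-- ===== SOURCE B (Python) =====
-- def getNumTrayMovingForLane(conveyors, laneId):
--     match_index = next((i for i, c in enumerate(conveyors)
--                         if 'laneId' in c and c['laneId'] == laneId), None)
--     if match_index is None:
--         return None
--     return sum(1 for c in conveyors[:match_index + 1] if c['tray'])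
-- ===== Notes on version B (the rewrite author's own statement) =====
-- stated objective: simpler
-- what changed: B separates the work into two passes - first find the index of the first conveyor whose laneId matches, then count truthy trays in the prefix up to and including it - instead of A's single loop threading a count accumulator.
import Mathlib
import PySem

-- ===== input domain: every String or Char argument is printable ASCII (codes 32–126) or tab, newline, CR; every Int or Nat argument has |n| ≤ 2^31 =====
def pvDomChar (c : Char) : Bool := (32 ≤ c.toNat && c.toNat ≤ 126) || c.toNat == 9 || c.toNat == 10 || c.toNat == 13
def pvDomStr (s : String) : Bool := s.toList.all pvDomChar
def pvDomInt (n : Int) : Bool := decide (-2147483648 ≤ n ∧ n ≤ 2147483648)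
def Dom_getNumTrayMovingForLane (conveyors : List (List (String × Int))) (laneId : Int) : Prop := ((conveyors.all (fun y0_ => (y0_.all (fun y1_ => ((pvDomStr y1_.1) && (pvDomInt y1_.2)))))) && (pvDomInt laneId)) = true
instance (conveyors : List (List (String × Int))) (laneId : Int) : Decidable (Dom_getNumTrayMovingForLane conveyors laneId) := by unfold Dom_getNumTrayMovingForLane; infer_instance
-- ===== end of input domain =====

-- B finds the first matching conveyor's index, then counts truthy trays in the prefix up to it,
-- instead of A's single loop threading a count accumulator (objective: simpler two-pass decomposition).

-- ===== PORT A =====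
-- A's loop: thread `count`; conveyor["tray"] is a dict lookup (first match in the assoc list);
-- a missing "tray" key is a KeyError in Python — excluded by Pre_ (outside Pre_ the port treats it as falsy).
def pvA_loop (laneId : Int) : List (List (String × Int)) → Int → Option Int
  | [], _ => none                                   -- loop falls off: Python returns None
  | c :: rest, count =>
    let count := match List.lookup "tray" c with    -- if conveyor["tray"]: count += 1
      | some t => if t ≠ 0 then count + 1 else count
      | none => count                               -- KeyError in Python; unreachable under Pre_
    match List.lookup "laneId" c with               -- if 'laneId' in conveyor:
    | some v => if v = laneId then some count       --   if conveyor["laneId"] == laneId: return count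
                else pvA_loop laneId rest count
    | none => pvA_loop laneId rest count

def getNumTrayMovingForLane (conveyors : List (List (String × Int))) (laneId : Int) : Option Int :=
  pvA_loop laneId conveyors 0

-- ===== PORT B =====
def pvB_isMatch (laneId : Int) (c : List (String × Int)) : Bool :=
  match List.lookup "laneId" c with
  | some v => v == laneId
  | none => false

def getNumTrayMovingForLane_alt (conveyors : List (List (String × Int))) (laneId : Int) : Option Int :=
  match List.findIdx? (pvB_isMatch laneId) conveyors with   -- next((i for i, c in enumerate(...) ...), None)
  | none => none
  | some i =>                                               -- sum(1 for c in conveyors[:i+1] if c['tray'])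
    some ((conveyors.take (i + 1)).countP (fun c => (List.lookup "tray" c).getD 0 ≠ 0) : Int)

-- ===== PRECONDITION & SPEC =====
def pvStop (laneId : Int) (conveyors : List (List (String × Int))) : Nat :=
  match List.findIdx? (pvB_isMatch laneId) conveyors with
  | some i => i + 1
  | none => conveyors.length

-- Pre_ excludes exactly the inputs where Python A raises KeyError: some conveyor scanned by A
-- (up to and including the first laneId match, or all of them if none matches) lacks a "tray" key.
def Pre_getNumTrayMovingForLane (conveyors : List (List (String × Int))) (laneId : Int) : Prop :=
  ∀ c ∈ conveyors.take (pvStop laneId conveyors), (List.lookup "tray" c).isSome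
instance (conveyors : List (List (String × Int))) (laneId : Int) : Decidable (Pre_getNumTrayMovingForLane conveyors laneId) := by unfold Pre_getNumTrayMovingForLane; infer_instance

def pvWitness_getNumTrayMovingForLane : (List (List (String × Int))) × Int :=
  ([[("tray", 1)], [("tray", 0), ("laneId", 7)]], 7)

def Spec_getNumTrayMovingForLane (conveyors : List (List (String × Int))) (laneId : Int) (out : Option Int) : Prop := out = getNumTrayMovingForLane_alt conveyors laneId
instance (conveyors : List (List (String × Int))) (laneId : Int) (out : Option Int) : Decidable (Spec_getNumTrayMovingForLane conveyors laneId out) := by unfold Spec_getNumTrayMovingForLane; infer_instance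

-- ===== CLAIM (what is proved, stated in full; the proofs are below) =====
def Claim_equal_getNumTrayMovingForLane : Prop := ∀ (conveyors : List (List (String × Int))) (laneId : Int), Dom_getNumTrayMovingForLane conveyors laneId → Pre_getNumTrayMovingForLane conveyors laneId → Spec_getNumTrayMovingForLane conveyors laneId (getNumTrayMovingForLane conveyors laneId)

-- ===== LEMMAS AND PROOFS =====

-- The loop, started at any accumulator value, equals B's two-pass result shifted by that accumulator.
lemma pvA_loop_eq (laneId : Int) (cs : List (List (String × Int))) (count : Int)
    (hpre : ∀ c ∈ cs.take (pvStop laneId cs), (List.lookup "tray" c).isSome) :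
    pvA_loop laneId cs count =
      match List.findIdx? (pvB_isMatch laneId) cs with
      | none => none
      | some i => some (count + ((cs.take (i + 1)).countP (fun c => (List.lookup "tray" c).getD 0 ≠ 0) : Int)) := by
  induction cs generalizing count with
  | nil => simp [pvA_loop]
  | cons c rest ih =>
    have hidx : List.findIdx? (pvB_isMatch laneId) (c :: rest) =
        if pvB_isMatch laneId c then some 0 else (List.findIdx? (pvB_isMatch laneId) rest).map (· + 1) := by
      simp [List.findIdx?_cons]
    have hstop : 0 < pvStop laneId (c :: rest) := by
      unfold pvStop
      rw [hidx]
      cases h : pvB_isMatch laneId c <;> simp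
      cases List.findIdx? (pvB_isMatch laneId) rest <;> simp
    have htrayc : (List.lookup "tray" c).isSome := by
      apply hpre
      cases hs : pvStop laneId (c :: rest) with
      | zero => omega
      | succ n => simp
    obtain ⟨t, ht⟩ := Option.isSome_iff_exists.mp htrayc
    by_cases hm : pvB_isMatch laneId c
    · -- first conveyor matches: A returns the updated count, B counts the one-element prefix
      obtain ⟨v, hv, hveq⟩ : ∃ v, List.lookup "laneId" c = some v ∧ v = laneId := by
        unfold pvB_isMatch at hm
        cases h : List.lookup "laneId" c with
        | none => simp [h] at hm
        | some v => exact ⟨v, rfl, by simpa [h] using hm⟩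
      simp only [pvA_loop, hidx, hm, if_true, ht, hv, hveq]
      by_cases h0 : t ≠ 0 <;> simp [h0, ht]
    · -- no match here: recurse with the updated accumulator
      have hstopr : pvStop laneId (c :: rest) = pvStop laneId rest + 1 := by
        unfold pvStop
        rw [hidx]
        simp only [hm, if_false, Bool.false_eq_true]
        cases List.findIdx? (pvB_isMatch laneId) rest <;> simp
      have hprer : ∀ d ∈ rest.take (pvStop laneId rest), (List.lookup "tray" d).isSome := by
        intro d hd
        exact hpre d (by rw [hstopr]; simp [List.take_succ_cons]; right; exact hd)
      have hnol : ∀ v, List.lookup "laneId" c = some v → v ≠ laneId := by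
        intro v hv hveq
        unfold pvB_isMatch at hm
        simp [hv, hveq] at hm
      set count' : Int := match List.lookup "tray" c with
        | some t => if t ≠ 0 then count + 1 else count
        | none => count with hcount'
      have hrec : pvA_loop laneId (c :: rest) count = pvA_loop laneId rest count' := by
        simp only [pvA_loop, ← hcount']
        cases hl : List.lookup "laneId" c with
        | none => rfl
        | some v => simp [hnol v hl]
      rw [hrec, ih count' hprer, hidx]
      simp only [hm, if_false, Bool.false_eq_true]
      cases hfi : List.findIdx? (pvB_isMatch laneId) rest with
      | none => simp
      | some i =>
        simp only [Option.map_some]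
        have : (c :: rest).take (i + 1 + 1) = c :: rest.take (i + 1) := by simp [List.take_succ_cons]
        rw [this, List.countP_cons]
        rw [hcount', ht]
        by_cases h0 : t ≠ 0 <;> simp [h0] <;> ring

-- ===== VERDICT (by name: the statement is the Claim_ definition above) =====
theorem getNumTrayMovingForLane_spec : Claim_equal_getNumTrayMovingForLane := by
  intro conveyors laneId _ hpre
  unfold Spec_getNumTrayMovingForLane getNumTrayMovingForLane getNumTrayMovingForLane_alt
  rw [pvA_loop_eq laneId conveyors 0 hpre]
  cases List.findIdx? (pvB_isMatch laneId) conveyors <;> simp
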